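-- pv_equiv track=rewrite | github.com/JanDuchscherer104/prml-vslam | src/prml_vslam/pipeline/stages/base/config.py | _valid_artifact_selector
-- ===== SOURCE A (Python) =====
-- def _valid_artifact_selector(selector: str) -> bool:
--     if not selector:
--         return False
--     if selector in {".", ".."} or "/" in selector or "\\" in selector:
--         return False
--     if any(token in selector for token in ("?", "[", "]")):
--         return False
--     if "*" not in selector:
--         return ":" not in selector
--     if not selector.endswith(":*") or selector.count("*") != 1:
--         return False
--     prefix = selector[:-2]
--     return bool(prefix) and ":" not in prefix
-- ===== SOURCE B (Python) =====
-- def _valid_artifact_selector(selector: str) -> bool: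
--     if selector in (".", ".."):
--         return False
--     body = selector[:-2] if selector.endswith(":*") else selector
--     return bool(body) and all(c not in "/\\?[]*:" for c in body)
-- ===== Notes on version B (the rewrite author's own statement) =====
-- stated objective: simpler
-- what changed: A's guard-chain of separate substring scans (dot check, per-token 'in' scans, '*' membership, endswith, count, prefix colon scan) is replaced by stripping the optional trailing colon-star suffix once and making a single character-class pass over the remaining body.
import Mathlib
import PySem

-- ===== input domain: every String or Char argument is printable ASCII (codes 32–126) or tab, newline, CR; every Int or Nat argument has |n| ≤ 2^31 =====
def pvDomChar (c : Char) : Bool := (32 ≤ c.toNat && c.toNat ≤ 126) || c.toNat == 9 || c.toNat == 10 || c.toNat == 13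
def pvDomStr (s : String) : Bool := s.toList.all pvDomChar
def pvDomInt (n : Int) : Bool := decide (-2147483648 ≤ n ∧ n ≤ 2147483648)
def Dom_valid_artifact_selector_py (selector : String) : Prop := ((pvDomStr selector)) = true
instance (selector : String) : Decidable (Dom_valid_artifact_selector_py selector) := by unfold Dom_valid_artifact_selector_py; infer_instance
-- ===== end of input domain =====

-- B replaces A's guard-chain of separate substring scans by one suffix-strip plus a
-- single character-class pass over the remaining body (objective: simpler).

-- ===== PORT A =====
-- literal transliteration of _valid_artifact_selector, on the code-point list
def valid_artifact_selector_py (selector : String) : Bool :=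
  let cs := selector.toList
  if cs.isEmpty then false
  else if cs = ['.'] || cs = ['.', '.']
       || PySem.Chars.isIn ['/'] cs || PySem.Chars.isIn ['\\'] cs then false
  else if [['?'], ['['], [']']].any (fun t => PySem.Chars.isIn t cs) then false
  else if !PySem.Chars.isIn ['*'] cs then !PySem.Chars.isIn [':'] cs
  else if !PySem.Chars.endswith cs [':', '*'] || PySem.Chars.count cs ['*'] ≠ 1 then false
  else
    let pre := PySem.Chars.slice cs none (some (-2))
    !pre.isEmpty && !PySem.Chars.isIn [':'] pre

-- ===== PORT B =====
def valid_artifact_selector_py_alt (selector : String) : Bool :=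
  let cs := selector.toList
  if cs = ['.'] || cs = ['.', '.'] then false
  else
    let body := if PySem.Chars.endswith cs [':', '*']
                then PySem.Chars.slice cs none (some (-2)) else cs
    !body.isEmpty && body.all (fun c => !(['/', '\\', '?', '[', ']', '*', ':'].contains c))

-- ===== PRECONDITION & SPEC =====
def Spec_valid_artifact_selector_py (selector : String) (out : Bool) : Prop := out = valid_artifact_selector_py_alt selector
instance (selector : String) (out : Bool) : Decidable (Spec_valid_artifact_selector_py selector out) := by unfold Spec_valid_artifact_selector_py; infer_instance

-- ===== CLAIM (what is proved, stated in full; the proofs are below) =====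
def Claim_equal_valid_artifact_selector_py : Prop := ∀ (selector : String), Dom_valid_artifact_selector_py selector → Spec_valid_artifact_selector_py selector (valid_artifact_selector_py selector)

-- ===== LEMMAS AND PROOFS =====

-- s.count(sub) for a one-character sub is the character count
lemma count_go_singleton (c : Char) (l : List Char) (fuel acc : ℕ) (h : l.length ≤ fuel) :
    PySem.Chars.count.go [c] fuel l acc = acc + l.count c := by
  induction l generalizing fuel acc with
  | nil => cases fuel <;> simp [PySem.Chars.count.go]
  | cons a t ih =>
    cases fuel with
    | zero => simp at h
    | succ f =>
      simp only [List.length_cons, Nat.succ_le_succ_iff] at h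
      by_cases hc : c = a
      · subst hc
        rw [show PySem.Chars.count.go [c] (f+1) (c :: t) acc
              = PySem.Chars.count.go [c] f t (acc + 1) by
            simp [PySem.Chars.count.go, List.isPrefixOf]]
        rw [ih f (acc+1) h]
        simp
        omega
      · rw [show PySem.Chars.count.go [c] (f+1) (a :: t) acc
              = PySem.Chars.count.go [c] f t acc by
            simp [PySem.Chars.count.go, List.isPrefixOf, hc]]
        rw [ih f acc h]
        simp [Ne.symm hc]

lemma count_singleton (cs : List Char) (c : Char) :
    PySem.Chars.count cs [c] = cs.count c := by
  simp [PySem.Chars.count]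
  rw [count_go_singleton c cs cs.length 0 le_rfl]
  omega

-- 'c in s' for a one-character needle is list membership, as a Bool rewrite
lemma isIn_singleton (c : Char) (l : List Char) :
    PySem.Chars.isIn [c] l = decide (c ∈ l) := by
  rw [Bool.eq_iff_iff, PySem.Chars.isIn_iff_infix, List.singleton_infix_iff]
  simp

-- the whole equivalence, stated over the underlying code-point list
lemma core_eq (cs : List Char) :
    (if cs.isEmpty then false
     else if cs = ['.'] || cs = ['.', '.']
          || PySem.Chars.isIn ['/'] cs || PySem.Chars.isIn ['\\'] cs then false
     else if [['?'], ['['], [']']].any (fun t => PySem.Chars.isIn t cs) then false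
     else if !PySem.Chars.isIn ['*'] cs then !PySem.Chars.isIn [':'] cs
     else if !PySem.Chars.endswith cs [':', '*'] || PySem.Chars.count cs ['*'] ≠ 1 then false
     else
       let pre := PySem.Chars.slice cs none (some (-2))
       !pre.isEmpty && !PySem.Chars.isIn [':'] pre)
    =
    (if cs = ['.'] || cs = ['.', '.'] then false
     else
       let body := if PySem.Chars.endswith cs [':', '*']
                   then PySem.Chars.slice cs none (some (-2)) else cs
       !body.isEmpty && body.all (fun c => !(['/', '\\', '?', '[', ']', '*', ':'].contains c))) := by
  by_cases hend : PySem.Chars.endswith cs [':', '*'] = true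
  · -- cs ends with ":*": write cs = p ++ [':','*']
    obtain ⟨p, hp⟩ := (PySem.Chars.endswith_iff cs [':', '*']).mp hend
    subst hp
    have hslice : PySem.Chars.slice (p ++ [':', '*']) none (some (-2)) = p := by
      rw [PySem.Chars.slice_eq_listSlice, PySem.List.slice_to_neg_ofNat _ 2 (by omega)]
      simp
    have hcount : PySem.Chars.count (p ++ [':', '*']) ['*'] = p.count '*' + 1 := by
      rw [count_singleton]; simp
    have hne1 : ¬(p ++ [':', '*'] = ['.']) := by
      intro h; apply_fun List.length at h; simp at h
    have hne2 : ¬(p ++ [':', '*'] = ['.', '.']) := by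
      rcases p with _ | ⟨a, t⟩
      · simp
      · intro h; apply_fun List.length at h; simp at h
    simp only [isIn_singleton, hend, hslice, hcount, hne1, hne2, if_true]
    rw [Bool.eq_iff_iff]
    simp [isIn_singleton, List.count_eq_zero, List.all_eq_true, List.isEmpty_iff]
    constructor
    · rintro ⟨⟨h1, h2⟩, ⟨h3, h4, h5⟩, h6, h7, h8⟩
      exact ⟨h7, fun x hx => ⟨fun e => h1 (e ▸ hx), fun e => h2 (e ▸ hx), fun e => h3 (e ▸ hx),
        fun e => h4 (e ▸ hx), fun e => h5 (e ▸ hx), fun e => h6 (e ▸ hx), fun e => h8 (e ▸ hx)⟩⟩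
    · rintro ⟨h7, hall⟩
      refine ⟨⟨fun hc => (hall _ hc).1 rfl, fun hc => (hall _ hc).2.1 rfl⟩,
        ⟨fun hc => (hall _ hc).2.2.1 rfl, fun hc => (hall _ hc).2.2.2.1 rfl,
         fun hc => (hall _ hc).2.2.2.2.1 rfl⟩,
        fun hc => (hall _ hc).2.2.2.2.2.1 rfl, h7, fun hc => (hall _ hc).2.2.2.2.2.2 rfl⟩
  · -- cs does not end with ":*": B's body is cs itself
    have hendF : PySem.Chars.endswith cs [':', '*'] = false := by simpa using hend
    rcases List.eq_nil_or_concat cs with h0 | ⟨l, a, hcons⟩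
    · subst h0; decide
    · have hne0 : cs.isEmpty = false := by rw [hcons]; simp
      by_cases hstar : '*' ∈ cs
      · -- '*' present but no ":*" suffix: both sides are false
        have hB : cs.all (fun c => !(['/', '\\', '?', '[', ']', '*', ':'].contains c)) = false := by
          rw [List.all_eq_false]
          exact ⟨'*', hstar, by simp⟩
        simp only [hendF, isIn_singleton, hne0]
        split_ifs <;> simp_all
      · have hstarF : ('*' ∈ cs) = False := by simp [hstar]
        simp only [isIn_singleton, hendF, hne0, hstarF]
        rw [Bool.eq_iff_iff]
        simp [isIn_singleton, List.all_eq_true]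
        constructor
        · rintro ⟨⟨⟨⟨hd1, hd2⟩, h1⟩, h2⟩, ⟨h3, h4, h5⟩, h6⟩
          refine ⟨⟨hd1, hd2⟩, by rw [hcons]; simp, fun x hx =>
            ⟨fun e => h1 (e ▸ hx), fun e => h2 (e ▸ hx), fun e => h3 (e ▸ hx),
             fun e => h4 (e ▸ hx), fun e => h5 (e ▸ hx), fun e => hstar (e ▸ hx),
             fun e => h6 (e ▸ hx)⟩⟩
        · rintro ⟨⟨hd1, hd2⟩, hne, hall⟩
          exact ⟨⟨⟨⟨hd1, hd2⟩, fun hc => (hall _ hc).1 rfl⟩, fun hc => (hall _ hc).2.1 rfl⟩,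
            ⟨fun hc => (hall _ hc).2.2.1 rfl, fun hc => (hall _ hc).2.2.2.1 rfl,
             fun hc => (hall _ hc).2.2.2.2.1 rfl⟩,
            fun hc => (hall _ hc).2.2.2.2.2.2 rfl⟩

-- ===== VERDICT (by name: the statement is the Claim_ definition above) =====
theorem valid_artifact_selector_py_spec : Claim_equal_valid_artifact_selector_py := by
  intro selector _
  unfold Spec_valid_artifact_selector_py valid_artifact_selector_py valid_artifact_selector_py_alt
  exact core_eq selector.toList
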